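-- pv_equiv track=rewrite | github.com/AlfandaviAU/KriptoTucil4WithTanur | src/rsa.py | olahPesanFromKalimat
-- ===== SOURCE A (Python) =====
-- def olahPesanFromKalimat(pesan):
--     pesan = pesan.strip()
--     split_strings = [pesan[index : index + 4] for index in range(0, len(pesan), 4)]
--     res = []
--     for i in range (len(split_strings)):
--         temp = []
--         for j in range (len(split_strings[i])):
--             temp2 = (ord(split_strings[i][j].lower())-97)
--             if (temp2 < 10):
--                 temp3 = "0"+str(temp2)
--                 temp.append(temp3)
--             else:
--                 temp.append(str(temp2))
--         res.append(str(temp[0]+temp[1]))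
--         if (len(temp) != (4/2)):
--             res.append(str(temp[2]+temp[3]))
--     return res
-- ===== SOURCE B (Python) =====
-- def olahPesanFromKalimat(pesan):
--     # Single flat pass: pair up characters two at a time (no chunk-by-4 outer
--     # loop, no temp list).  s[i+1] on an odd-length stripped string raises
--     # IndexError, just as the original does.
--     s = pesan.strip()
--     res = []
--     i = 0
--     while i < len(s):
--         v = ord(s[i].lower()) - 97
--         w = ord(s[i + 1].lower()) - 97
--         res.append(("0" + str(v) if v < 10 else str(v)) + ("0" + str(w) if w < 10 else str(w)))
--         i += 2
--     return res
-- ===== Notes on version B (the rewrite author's own statement) =====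
-- stated objective: simpler
-- what changed: Replaced the chunk-into-4-substrings outer loop with its per-chunk temp list and len(temp)!=2 branch by a single flat pass that pairs characters two at a time.
import Mathlib
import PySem

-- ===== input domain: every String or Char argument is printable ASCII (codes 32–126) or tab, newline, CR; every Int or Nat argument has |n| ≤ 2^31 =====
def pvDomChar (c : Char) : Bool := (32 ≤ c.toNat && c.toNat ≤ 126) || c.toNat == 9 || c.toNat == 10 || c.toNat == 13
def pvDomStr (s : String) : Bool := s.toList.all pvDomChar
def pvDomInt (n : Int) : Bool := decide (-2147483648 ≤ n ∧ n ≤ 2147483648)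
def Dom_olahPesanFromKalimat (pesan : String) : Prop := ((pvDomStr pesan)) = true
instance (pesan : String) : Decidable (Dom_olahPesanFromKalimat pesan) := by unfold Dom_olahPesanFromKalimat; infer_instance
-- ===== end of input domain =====

-- B replaces A's chunk-by-4 outer loop with one flat two-characters-at-a-time pass (simpler
-- decomposition, same cost); equivalence is about the return value only.

-- ===== PORT A =====
-- literal transliteration of A: strip, chunk into 4-char slices, per chunk build the
-- per-character code list `temp`, then emit temp[0]+temp[1] and (for chunks of ≠2 codes)
-- temp[2]+temp[3].  Python raises IndexError on those `temp[...]` for odd-length input;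
-- there pyGetD's default "" is used — exactly those inputs are excluded by Pre_.
def olahPesanFromKalimat (pesan : String) : List String :=
  let s := (PySem.Str.strip pesan).toList
  let split_strings := (PySem.List.pyRange 0 s.length 4).map
      (fun index => PySem.List.slice s (some index) (some (index + 4)))
  (PySem.List.pyRange 0 split_strings.length 1).foldl (fun res i =>
    let chunk := PySem.List.pyGetD split_strings i []
    let temp := (PySem.List.pyRange 0 chunk.length 1).foldl (fun temp j =>
      let temp2 : Int := ((PySem.Chars.lowerChar (PySem.List.pyGetD chunk j ' ')).toNat : Int) - 97
      if temp2 < 10 then temp ++ ["0" ++ PySem.Int.toStr temp2]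
      else temp ++ [PySem.Int.toStr temp2]) []
    let res := res ++ [PySem.List.pyGetD temp 0 "" ++ PySem.List.pyGetD temp 1 ""]
    if temp.length ≠ 2 then res ++ [PySem.List.pyGetD temp 2 "" ++ PySem.List.pyGetD temp 3 ""]
    else res) []

-- ===== PORT B =====
-- helper for B: the two-digit code of one character (`v = ord(c.lower()) - 97`)
def pvKode (c : Char) : String :=
  let v : Int := ((PySem.Chars.lowerChar c).toNat : Int) - 97
  if v < 10 then "0" ++ PySem.Int.toStr v else PySem.Int.toStr v

-- B's while-loop 'i += 2 reading s[i], s[i+1]' as two-at-a-time structural recursion;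
-- on a final singleton Python raises IndexError (s[i+1]) — excluded by Pre_.
def pvPairs : List Char → List String
  | a :: b :: rest => (pvKode a ++ pvKode b) :: pvPairs rest
  | _ => []

def olahPesanFromKalimat_alt (pesan : String) : List String :=
  pvPairs (PySem.Str.strip pesan).toList

-- ===== PRECONDITION & SPEC =====
-- Pre_ excludes exactly the inputs whose stripped length is odd: there A (temp[1]/temp[3])
-- and B (s[i+1]) both raise IndexError.
def Pre_olahPesanFromKalimat (pesan : String) : Prop :=
  (PySem.Chars.strip pesan.toList).length % 2 = 0
instance (pesan : String) : Decidable (Pre_olahPesanFromKalimat pesan) := by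
  unfold Pre_olahPesanFromKalimat; infer_instance
def pvWitness_olahPesanFromKalimat : String := "hiya"

def Spec_olahPesanFromKalimat (pesan : String) (out : List String) : Prop := out = olahPesanFromKalimat_alt pesan
instance (pesan : String) (out : List String) : Decidable (Spec_olahPesanFromKalimat pesan out) := by unfold Spec_olahPesanFromKalimat; infer_instance

-- ===== CLAIM (what is proved, stated in full; the proofs are below) =====
def Claim_equal_olahPesanFromKalimat : Prop := ∀ (pesan : String), Dom_olahPesanFromKalimat pesan → Pre_olahPesanFromKalimat pesan → Spec_olahPesanFromKalimat pesan (olahPesanFromKalimat pesan)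

-- ===== LEMMAS AND PROOFS =====

-- 4-chunking, the recursive view
def pvChunk4 : List Char → List (List Char)
  | [] => []
  | a :: b :: c :: d :: rest => [a, b, c, d] :: pvChunk4 rest
  | [a] => [[a]]
  | [a, b] => [[a, b]]
  | [a, b, c] => [[a, b, c]]

theorem pvChunk4_step (s : List Char) (h : s ≠ []) :
    pvChunk4 s = s.take 4 :: pvChunk4 (s.drop 4) := by
  match s with
  | [] => exact absurd rfl h
  | [a] => rfl
  | [a, b] => rfl
  | [a, b, c] => rfl
  | a :: b :: c :: d :: rest => rfl

-- A's slice comprehension computes pvChunk4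
theorem pvRangeMap_eq_chunk4 (m : Nat) :
    ∀ s : List Char, s ≠ [] → m = (s.length + 3) / 4 →
      (List.range m).map (fun k => (s.drop (4 * k)).take 4) = pvChunk4 s := by
  induction m with
  | zero =>
    intro s hne hm
    have : s.length ≠ 0 := fun h => hne (List.eq_nil_of_length_eq_zero h)
    omega
  | succ m ih =>
    intro s hne hm
    rw [List.range_succ_eq_map, List.map_cons, List.map_map, pvChunk4_step s hne]
    refine congrArg₂ _ (by simp) ?_
    by_cases h4 : s.length ≤ 4
    · have hm0 : m = 0 := by
        have : s.length ≠ 0 := fun h => hne (List.eq_nil_of_length_eq_zero h)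
        omega
      have hd : s.drop 4 = [] := by
        apply List.eq_nil_of_length_eq_zero; simp; omega
      simp [hm0, hd, pvChunk4]
    · have hne' : s.drop 4 ≠ [] := by
        intro h
        have := congrArg List.length h
        simp at this; omega
      rw [← ih (s.drop 4) hne' (by simp; omega)]
      apply List.map_congr_left
      intro k _
      simp [Function.comp, List.drop_drop]
      ring_nf

-- the per-chunk code function of A is pvKode
theorem pvCode_eq (c : Char) :
    (if ((PySem.Chars.lowerChar c).toNat : Int) - 97 < 10
      then "0" ++ PySem.Int.toStr (((PySem.Chars.lowerChar c).toNat : Int) - 97)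
      else PySem.Int.toStr (((PySem.Chars.lowerChar c).toNat : Int) - 97)) = pvKode c := rfl

-- the outer fold over pvChunk4 produces the flat pair list, for even length
theorem pvFold_chunk4 (s : List Char) (h : s.length % 2 = 0) :
    ∀ acc : List String,
      (pvChunk4 s).foldl (fun res chunk =>
        let temp := chunk.map pvKode
        let res := res ++ [PySem.List.pyGetD temp 0 "" ++ PySem.List.pyGetD temp 1 ""]
        if temp.length ≠ 2 then res ++ [PySem.List.pyGetD temp 2 "" ++ PySem.List.pyGetD temp 3 ""]
        else res) acc = acc ++ pvPairs s := by
  match s with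
  | [] => intro acc; simp [pvChunk4, pvPairs]
  | [a] => simp at h
  | [a, b] =>
    intro acc
    simp [pvChunk4, pvPairs, PySem.List.pyGetD, PySem.List.pyGet?, PySem.List.pyIdx?]
  | [a, b, c] => simp at h
  | a :: b :: c :: d :: rest =>
    intro acc
    have hr : rest.length % 2 = 0 := by simp at h; omega
    rw [show pvChunk4 (a :: b :: c :: d :: rest) = [a,b,c,d] :: pvChunk4 rest from rfl,
        List.foldl_cons, pvFold_chunk4 rest hr]
    show (if _ then _ else _) ++ _ = _
    simp [pvPairs, PySem.List.pyGetD, PySem.List.pyGet?, PySem.List.pyIdx?]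
  termination_by s.length

-- proof-side names for A's loop bodies (definitionally the port's lambdas)
def pvStepA (temp : List String) (c : Char) : List String :=
  let temp2 : Int := ((PySem.Chars.lowerChar c).toNat : Int) - 97
  if temp2 < 10 then temp ++ ["0" ++ PySem.Int.toStr temp2]
  else temp ++ [PySem.Int.toStr temp2]

def pvBodyA (res : List String) (chunk : List Char) : List String :=
  let temp := (PySem.List.pyRange 0 chunk.length 1).foldl
      (fun temp j => pvStepA temp (PySem.List.pyGetD chunk j ' ')) []
  let res := res ++ [PySem.List.pyGetD temp 0 "" ++ PySem.List.pyGetD temp 1 ""]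
  if temp.length ≠ 2 then res ++ [PySem.List.pyGetD temp 2 "" ++ PySem.List.pyGetD temp 3 ""]
  else res

theorem pvStepA_eq : pvStepA = fun temp c => temp ++ [pvKode c] := by
  funext temp c
  show (if _ then _ else _) = _
  rw [← pvCode_eq c]
  split <;> rfl

theorem pvBodyA_eq : pvBodyA = fun res chunk =>
    let temp := chunk.map pvKode
    let res := res ++ [PySem.List.pyGetD temp 0 "" ++ PySem.List.pyGetD temp 1 ""]
    if temp.length ≠ 2 then res ++ [PySem.List.pyGetD temp 2 "" ++ PySem.List.pyGetD temp 3 ""]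
    else res := by
  funext res chunk
  unfold pvBodyA
  rw [PySem.List.foldl_pyRange_zero_pyGetD' chunk ' ' pvStepA [], pvStepA_eq,
      PySem.List.foldl_append_singleton_eq_map, List.nil_append]

-- the master equation on the stripped character list
theorem pvA_eq (s : List Char) (h : s.length % 2 = 0) :
    (let split_strings := (PySem.List.pyRange 0 s.length 4).map
        (fun index => PySem.List.slice s (some index) (some (index + 4)))
     (PySem.List.pyRange 0 split_strings.length 1).foldl
        (fun res i => pvBodyA res (PySem.List.pyGetD split_strings i [])) [])
      = pvPairs s := by
  have hchunks : (PySem.List.pyRange 0 (s.length : Int) 4).map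
      (fun index => PySem.List.slice s (some index) (some (index + 4))) = pvChunk4 s := by
    by_cases hnil : s = []
    · subst hnil
      rw [show ((([] : List Char).length : Int)) = 0 from rfl,
          PySem.List.pyRange_of_pos (s := 4) 0 0 (by norm_num)]
      simp [pvChunk4]
    · rw [PySem.List.pyRange_of_pos _ _ (by norm_num), List.map_map]
      have hlen : 0 < s.length := List.length_pos_of_ne_nil hnil
      have hm : (if (0:Int) < (s.length:Int) then ((((s.length:Int)) - 0 + 4 - 1) / 4).toNat else 0)
          = (s.length + 3) / 4 := by
        rw [if_pos (by exact_mod_cast hlen)]; omega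
      rw [hm, ← pvRangeMap_eq_chunk4 _ s hnil rfl]
      apply List.map_congr_left
      intro k _
      show PySem.List.slice s (some (0 + 4 * (k:Int))) (some (0 + 4 * (k:Int) + 4)) = _
      have h1 : (0 + 4 * (k:Int)) = ((4 * k : Nat) : Int) := by push_cast; ring
      rw [h1]
      exact_mod_cast PySem.List.slice_natCast_add s (4 * k) 4
  simp only [hchunks]
  rw [PySem.List.foldl_pyRange_zero_pyGetD' (pvChunk4 s) [] pvBodyA [], pvBodyA_eq,
      pvFold_chunk4 s h [], List.nil_append]

-- ===== VERDICT (by name: the statement is the Claim_ definition above) =====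
theorem olahPesanFromKalimat_spec : Claim_equal_olahPesanFromKalimat := by
  intro pesan _ hpre
  have hpre' : ((PySem.Str.strip pesan).toList).length % 2 = 0 := by
    rw [PySem.Str.toList_strip]; exact hpre
  exact pvA_eq ((PySem.Str.strip pesan).toList) hpre'
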